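-- pv_equiv track=rewrite | github.com/vijayshahwal/project-euler | problem112.py | bouncy
-- ===== SOURCE A (Python) =====
-- def bouncy(n):
--      lis=[]
--      while(n):
--           lis.append(n%10)
--           n//=10
--      lis=list(reversed(lis))
--      slis=list(sorted(lis))
--      rlis=list(sorted(lis,reverse=True))
--      if(lis==slis or lis==rlis):
--           return False
--      return True
-- ===== SOURCE B (Python) =====
-- def bouncy(n):
--     digits = []
--     while n:
--         digits.append(n % 10)
--         n //= 10
--     non_decreasing = non_increasing = True
--     prev = None
--     for d in digits:
--         if prev is not None:
--             if d < prev: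
--                 non_decreasing = False
--             if d > prev:
--                 non_increasing = False
--         prev = d
--     return not (non_decreasing or non_increasing)
-- ===== Notes on version B (the rewrite author's own statement) =====
-- stated objective: simpler
-- what changed: Replaces the two sorts and list comparisons by a single pass over the extracted digits maintaining two monotonicity flags (no reversal, no sorting).
import Mathlib
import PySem

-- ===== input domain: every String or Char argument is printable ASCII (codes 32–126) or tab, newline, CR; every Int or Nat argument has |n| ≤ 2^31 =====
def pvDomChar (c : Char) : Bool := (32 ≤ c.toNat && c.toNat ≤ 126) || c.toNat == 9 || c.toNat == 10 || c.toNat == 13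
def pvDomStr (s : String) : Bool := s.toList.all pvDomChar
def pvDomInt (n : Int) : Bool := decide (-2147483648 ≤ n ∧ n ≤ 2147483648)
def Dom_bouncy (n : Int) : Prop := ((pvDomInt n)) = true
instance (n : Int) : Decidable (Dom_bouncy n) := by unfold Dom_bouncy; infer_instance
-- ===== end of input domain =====

-- B replaces A's two sorts and list comparisons by a single pass over the digits with two
-- monotonicity flags (objective: simpler). On n < 0 Python A never terminates; the ports
-- recurse on n.toNat (exact for n ≥ 0, the inputs on which A returns).

-- ===== PORT A =====
-- A's digit loop: while n: lis.append(n%10); n//=10.  Recursion on Nat is exact for n ≥ 0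
-- (where A returns; on n < 0 the Python loop never terminates): there Python's n%10 and
-- n//10 coincide with Nat % and /.
def bouncyLoopA (n : Nat) (lis : List Int) : List Int :=
  if n = 0 then lis else bouncyLoopA (n / 10) (lis ++ [((n : Int) % 10)])
  decreasing_by exact Nat.div_lt_self (Nat.pos_of_ne_zero (by assumption)) (by norm_num)

def bouncy (n : Int) : Bool :=
  let lis := (bouncyLoopA n.toNat []).reverse
  let slis := PySem.List.sorted lis (fun x => x) false
  let rlis := PySem.List.sorted lis (fun x => x) true
  if lis = slis ∨ lis = rlis then false else true

-- ===== PORT B =====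
-- B's identical digit loop (same comment as above applies).
def bouncyLoopB (n : Nat) (digits : List Int) : List Int :=
  if n = 0 then digits else bouncyLoopB (n / 10) (digits ++ [((n : Int) % 10)])
  decreasing_by exact Nat.div_lt_self (Nat.pos_of_ne_zero (by assumption)) (by norm_num)

-- the prev-walk of Source B: first element initialises prev, then each step updates the flags
def bouncyScan : Int → Bool → Bool → List Int → Bool
  | _, nd, ni, [] => !(nd || ni)
  | prev, nd, ni, d :: rest =>
      bouncyScan d (if d < prev then false else nd) (if prev < d then false else ni) rest

def bouncy_alt (n : Int) : Bool :=
  match bouncyLoopB n.toNat [] with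
  | [] => !(true || true)
  | d :: rest => bouncyScan d true true rest

-- ===== PRECONDITION & SPEC =====
def Spec_bouncy (n : Int) (out : Bool) : Prop := out = bouncy_alt n
instance (n : Int) (out : Bool) : Decidable (Spec_bouncy n out) := by unfold Spec_bouncy; infer_instance

-- ===== CLAIM (what is proved, stated in full; the proofs are below) =====
def Claim_equal_bouncy : Prop := ∀ (n : Int), Dom_bouncy n → Spec_bouncy n (bouncy n)

-- ===== LEMMAS AND PROOFS =====

-- consecutive-pair monotonicity as Bool predicates (proof-side characterisation of the scan)
def chainLE : List Int → Bool
  | [] => true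
  | [_] => true
  | a :: b :: r => (decide (a ≤ b)) && chainLE (b :: r)

def chainGE : List Int → Bool
  | [] => true
  | [_] => true
  | a :: b :: r => (decide (b ≤ a)) && chainGE (b :: r)

theorem loopA_eq_loopB (n : Nat) (l : List Int) : bouncyLoopA n l = bouncyLoopB n l := by
  fun_induction bouncyLoopA n l <;> rw [bouncyLoopB] <;> simp_all

theorem scan_eq (l : List Int) (prev : Int) (nd ni : Bool) :
    bouncyScan prev nd ni l
      = !((nd && chainLE (prev :: l)) || (ni && chainGE (prev :: l))) := by
  induction l generalizing prev nd ni with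
  | nil => simp [bouncyScan, chainLE, chainGE]
  | cons d rest ih =>
      rw [bouncyScan, ih]
      rcases lt_trichotomy prev d with h | h | h
      · have h1 : ¬ d < prev := by omega
        have h2 : prev ≤ d := by omega
        have h3 : ¬ d ≤ prev := by omega
        simp [chainLE, chainGE, h, h1, h2, h3]
      · subst h
        simp [chainLE, chainGE, lt_irrefl]
      · have h1 : ¬ prev < d := by omega
        have h2 : d ≤ prev := by omega
        have h3 : ¬ prev ≤ d := by omega
        simp [chainLE, chainGE, h, h1, h2, h3]

theorem chainLE_iff (l : List Int) : chainLE l = true ↔ List.Pairwise (· ≤ ·) l := by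
  induction l with
  | nil => simp [chainLE]
  | cons a t ih =>
      cases t with
      | nil => simp [chainLE]
      | cons b r =>
          rw [chainLE, List.pairwise_cons, ← ih]
          simp only [Bool.and_eq_true, decide_eq_true_eq]
          constructor
          · rintro ⟨hab, hrest⟩
            refine ⟨?_, hrest⟩
            intro y hy
            rcases List.mem_cons.mp hy with rfl | hy
            · exact hab
            · have hp := ih.mp hrest
              rcases List.pairwise_cons.mp hp with ⟨hb, _⟩
              exact le_trans hab (hb y hy)
          · rintro ⟨hall, hrest⟩
            exact ⟨hall b (by simp), hrest⟩

theorem chainGE_iff (l : List Int) : chainGE l = true ↔ List.Pairwise (fun a b => b ≤ a) l := by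
  induction l with
  | nil => simp [chainGE]
  | cons a t ih =>
      cases t with
      | nil => simp [chainGE]
      | cons b r =>
          rw [chainGE, List.pairwise_cons, ← ih]
          simp only [Bool.and_eq_true, decide_eq_true_eq]
          constructor
          · rintro ⟨hab, hrest⟩
            refine ⟨?_, hrest⟩
            intro y hy
            rcases List.mem_cons.mp hy with rfl | hy
            · exact hab
            · have hp := ih.mp hrest
              rcases List.pairwise_cons.mp hp with ⟨hb, _⟩
              exact le_trans (hb y hy) hab
          · rintro ⟨hall, hrest⟩
            exact ⟨hall b (by simp), hrest⟩

theorem eqA_sorted (l : List Int) :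
    (l.reverse = PySem.List.sorted l.reverse (fun x => x) false) ↔ chainGE l = true := by
  rw [chainGE_iff, ← List.pairwise_reverse]
  constructor
  · intro h
    have hp := PySem.List.sorted_pairwise (xs := l.reverse) (key := fun x => x)
    rw [← h] at hp
    exact hp
  · intro h
    exact (PySem.List.sorted_eq_self_of_pairwise l.reverse (fun x => x) h).symm

theorem eqA_sorted_rev (l : List Int) :
    (l.reverse = PySem.List.sorted l.reverse (fun x => x) true) ↔ chainLE l = true := by
  rw [chainLE_iff]
  have hrev : (List.Pairwise (fun a b : Int => b ≤ a) l.reverse) ↔ List.Pairwise (· ≤ ·) l :=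
    List.pairwise_reverse
  constructor
  · intro h
    have hp := PySem.List.sorted_pairwise_rev (xs := l.reverse) (key := fun x => x)
    rw [← h] at hp
    exact hrev.mp hp
  · intro h
    exact (PySem.List.sorted_rev_eq_self_of_pairwise l.reverse (fun x => x) (hrev.mpr h)).symm

-- ===== VERDICT (by name: the statement is the Claim_ definition above) =====
theorem bouncy_spec : Claim_equal_bouncy := by
  intro n _
  unfold Spec_bouncy bouncy bouncy_alt
  rw [← loopA_eq_loopB]
  cases hl : bouncyLoopA n.toNat [] with
  | nil => simp [PySem.List.sorted]
  | cons d rest =>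
      show (if (d :: rest).reverse = PySem.List.sorted (d :: rest).reverse (fun x => x) false ∨
              (d :: rest).reverse = PySem.List.sorted (d :: rest).reverse (fun x => x) true
            then false else true) = bouncyScan d true true rest
      have hA := eqA_sorted (d :: rest)
      have hB := eqA_sorted_rev (d :: rest)
      rw [scan_eq]
      by_cases h1 : chainGE (d :: rest) = true
      · rw [if_pos (Or.inl (hA.mpr h1)), h1]
        cases hc : chainLE (d :: rest) <;> simp
      · by_cases h2 : chainLE (d :: rest) = true
        · rw [if_pos (Or.inr (hB.mpr h2)), h2, Bool.eq_false_iff.mpr h1]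
          simp
        · rw [if_neg ?_, Bool.eq_false_iff.mpr h1, Bool.eq_false_iff.mpr h2]
          · simp
          · rintro (h | h)
            · exact h1 (hA.mp h)
            · exact h2 (hB.mp h)
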